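-- pv_equiv track=rewrite | github.com/perevera/advent-of-code-2023 | src/day13.py | recurse_find_one
-- ===== SOURCE A (Python) =====
-- def recurse_find_one(row: list, i_1, i_2):
--     """
--     Recursive function to assert all rows/columns are mirrored (but one last at the end, maybe)
--     :param row:
--     :param i_1:
--     :param i_2:
--     :return:
--     """
--     if i_1 < 0 or i_2 >= len(row):
--         return True
--     else:
--         if row[i_1] == row[i_2]:
--             if i_1 == 0 or i_2 == len(row) - 1:
--                 return True
--             else:
--                 return recurse_find_one(row, i_1 - 1, i_2 + 1)
--         else:
--             return False
-- ===== SOURCE B (Python) =====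
-- def recurse_find_one(row: list, i_1, i_2):
--     """Iterative re-implementation: walk the two indices outward in a while loop."""
--     n = len(row)
--     while i_1 >= 0 and i_2 < n:
--         if row[i_1] != row[i_2]:
--             return False
--         if i_1 == 0 or i_2 == n - 1:
--             return True
--         i_1 -= 1
--         i_2 += 1
--     return True
-- ===== Notes on version B (the rewrite author's own statement) =====
-- stated objective: idiomatic
-- what changed: The tail recursion is replaced by an iterative while-loop over the same pair of indices (loop condition replaces the first guard, mismatch test inverted to an early False return); Pre_ excludes only the inputs where both raise IndexError.
import Mathlib
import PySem

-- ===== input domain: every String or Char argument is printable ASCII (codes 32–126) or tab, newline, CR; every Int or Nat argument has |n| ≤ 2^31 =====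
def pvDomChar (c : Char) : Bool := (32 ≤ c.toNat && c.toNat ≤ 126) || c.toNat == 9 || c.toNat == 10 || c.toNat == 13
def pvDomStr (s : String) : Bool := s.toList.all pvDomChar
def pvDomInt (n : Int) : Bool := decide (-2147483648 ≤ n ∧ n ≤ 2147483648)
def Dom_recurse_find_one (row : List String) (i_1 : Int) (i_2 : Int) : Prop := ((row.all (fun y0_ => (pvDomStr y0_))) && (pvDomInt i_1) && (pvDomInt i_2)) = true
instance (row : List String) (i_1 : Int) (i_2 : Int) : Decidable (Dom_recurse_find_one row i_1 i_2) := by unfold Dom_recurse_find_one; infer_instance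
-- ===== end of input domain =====

-- B replaces A's tail recursion by an iterative while-loop over the same two indices (idiomatic rewrite, same cost).

-- ===== PORT A =====
-- literal transliteration of A's recursion; a 'none' from pyGet? is Python's IndexError, excluded by Pre_
def recurse_find_one (row : List String) (i_1 : Int) (i_2 : Int) : Bool :=
  if i_1 < 0 ∨ i_2 ≥ (row.length : Int) then true
  else
    match PySem.List.pyGet? row i_1, PySem.List.pyGet? row i_2 with
    | some a, some b =>
      if a = b then
        if i_1 = 0 ∨ i_2 = (row.length : Int) - 1 then true
        else recurse_find_one row (i_1 - 1) (i_2 + 1)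
      else false
    | _, _ => false  -- IndexError in Python (outside Pre_)
termination_by i_1.toNat
decreasing_by omega

-- ===== PORT B =====
-- the body of Source B's 'while i_1 >= 0 and i_2 < n' loop; loop state is the pair of indices
def findOneLoop (row : List String) (i_1 : Int) (i_2 : Int) : Bool :=
  if i_1 ≥ 0 ∧ i_2 < (row.length : Int) then
    match PySem.List.pyGet? row i_1 with
    | none => false  -- IndexError in Python (outside Pre_)
    | some a =>
      match PySem.List.pyGet? row i_2 with
      | none => false  -- IndexError in Python (outside Pre_)
      | some b =>
        if a ≠ b then false
        else if i_1 = 0 ∨ i_2 = (row.length : Int) - 1 then true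
        else findOneLoop row (i_1 - 1) (i_2 + 1)
  else true

termination_by i_1.toNat
decreasing_by omega

def recurse_find_one_alt (row : List String) (i_1 : Int) (i_2 : Int) : Bool :=
  findOneLoop row i_1 i_2

-- ===== PRECONDITION & SPEC =====
-- Pre_ excludes exactly the inputs where Python A raises IndexError on its first subscript
-- (i_1 ≥ 0 and i_2 < len(row) but i_1 ≥ len(row) or i_2 < -len(row)); B raises there too.
def Pre_recurse_find_one (row : List String) (i_1 : Int) (i_2 : Int) : Prop :=
  i_1 < 0 ∨ i_2 ≥ (row.length : Int) ∨ (i_1 < (row.length : Int) ∧ i_2 ≥ -(row.length : Int))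
instance (row : List String) (i_1 : Int) (i_2 : Int) : Decidable (Pre_recurse_find_one row i_1 i_2) := by unfold Pre_recurse_find_one; infer_instance

def pvWitness_recurse_find_one : List String × Int × Int := (["#.#", "..#", "..#", "#.#"], 1, 2)

def Spec_recurse_find_one (row : List String) (i_1 : Int) (i_2 : Int) (out : Bool) : Prop := out = recurse_find_one_alt row i_1 i_2
instance (row : List String) (i_1 : Int) (i_2 : Int) (out : Bool) : Decidable (Spec_recurse_find_one row i_1 i_2 out) := by unfold Spec_recurse_find_one; infer_instance

-- ===== CLAIM =====
def Claim_equal_recurse_find_one : Prop := ∀ (row : List String) (i_1 : Int) (i_2 : Int), Dom_recurse_find_one row i_1 i_2 → Pre_recurse_find_one row i_1 i_2 → Spec_recurse_find_one row i_1 i_2 (recurse_find_one row i_1 i_2)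

-- ===== LEMMAS AND PROOFS =====
-- the two functions agree on all inputs: both stop with true on the same boundary condition,
-- return false on the same mismatch / out-of-range lookup, and step to the same next state
theorem recurse_find_one_eq_loop (k : Nat) (row : List String) (i_1 i_2 : Int)
    (hk : i_1.toNat ≤ k) : recurse_find_one row i_1 i_2 = findOneLoop row i_1 i_2 := by
  induction k generalizing i_1 i_2 with
  | zero =>
    rw [recurse_find_one, findOneLoop]
    by_cases h : i_1 < 0 ∨ i_2 ≥ (row.length : Int)
    · rw [if_pos h, if_neg (show ¬(i_1 ≥ 0 ∧ i_2 < (row.length : Int)) by omega)]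
    · rw [if_pos (show i_1 ≥ 0 ∧ i_2 < (row.length : Int) by omega), if_neg h]
      cases PySem.List.pyGet? row i_1 with
      | none => rfl
      | some a =>
        cases PySem.List.pyGet? row i_2 with
        | none => rfl
        | some b =>
          dsimp only
          by_cases hab : a = b
          · have h0 : i_1 = 0 ∨ i_2 = (row.length : Int) - 1 := Or.inl (by omega)
            rw [if_pos hab, if_neg (show ¬a ≠ b by simp [hab]), if_pos h0, if_pos h0]
          · rw [if_neg hab, if_pos (show a ≠ b from hab)]
  | succ n ih =>
    rw [recurse_find_one, findOneLoop]
    by_cases h : i_1 < 0 ∨ i_2 ≥ (row.length : Int)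
    · rw [if_pos h, if_neg (show ¬(i_1 ≥ 0 ∧ i_2 < (row.length : Int)) by omega)]
    · rw [if_pos (show i_1 ≥ 0 ∧ i_2 < (row.length : Int) by omega), if_neg h]
      cases PySem.List.pyGet? row i_1 with
      | none => rfl
      | some a =>
        cases PySem.List.pyGet? row i_2 with
        | none => rfl
        | some b =>
          dsimp only
          by_cases hab : a = b
          · rw [if_pos hab, if_neg (show ¬a ≠ b by simp [hab])]
            by_cases hstop : i_1 = 0 ∨ i_2 = (row.length : Int) - 1
            · rw [if_pos hstop, if_pos hstop]
            · rw [if_neg hstop, if_neg hstop]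
              exact ih _ _ (by omega)
          · rw [if_neg hab, if_pos (show a ≠ b from hab)]

-- ===== VERDICT =====
theorem recurse_find_one_spec : Claim_equal_recurse_find_one := by
  intro row i_1 i_2 _ _
  unfold Spec_recurse_find_one recurse_find_one_alt
  exact recurse_find_one_eq_loop i_1.toNat row i_1 i_2 le_rfl
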